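-- pv_equiv track=rewrite | github.com/981377660LMT/algorithm-study | 2_queue/单调队列/Costly Flight of Stairs-相邻间隔不大于k的子序列最小和dp.py | solve
-- ===== SOURCE A (Python) =====
-- from collections import deque
--
-- def solve(nums, k):
--     n = len(nums)
--     # 以i结尾的最小和，必须取i
--     dp = [int(1e20)] * n
--     dp[0] = nums[0]
--     queue = deque([0])
--
--     for i in range(1, n):
--         while queue and i - queue[0] > k:
--             queue.popleft()
--
--         dp[i] = nums[i] + dp[queue[0]]
--
--         while queue and dp[queue[-1]] > dp[i]:
--             queue.pop()
--         queue.append(i)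
--
--     return dp[-1]
-- ===== SOURCE B (Python) =====
-- def solve(nums, k):
--     # same dp recurrence, but no deque: rescan the window of the last k entries
--     dp = [nums[0]]
--     for i in range(1, len(nums)):
--         lo = max(0, i - k)
--         dp.append(nums[i] + min(dp[lo:i]))
--     return dp[-1]
-- ===== Notes on version B (the rewrite author's own statement) =====
-- stated objective: simpler
-- what changed: Dropped the monotonic deque entirely: B keeps only the dp list, grown by append, and computes each dp[i] by taking min over the slice of the last <=k dp entries instead of maintaining a sliding-window-minimum queue.
import Mathlib
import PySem

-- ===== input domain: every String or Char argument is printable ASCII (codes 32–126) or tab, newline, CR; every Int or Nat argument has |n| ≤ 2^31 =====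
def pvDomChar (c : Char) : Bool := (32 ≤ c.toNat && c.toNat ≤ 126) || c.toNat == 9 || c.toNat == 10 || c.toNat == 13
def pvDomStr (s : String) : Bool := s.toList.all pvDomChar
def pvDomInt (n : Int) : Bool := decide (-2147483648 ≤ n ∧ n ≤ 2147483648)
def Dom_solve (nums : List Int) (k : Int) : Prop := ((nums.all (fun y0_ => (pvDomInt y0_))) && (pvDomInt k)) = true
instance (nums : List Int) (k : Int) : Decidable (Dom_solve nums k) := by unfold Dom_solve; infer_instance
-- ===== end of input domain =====

-- B drops A's monotonic deque and recomputes each window minimum by rescanning the last ≤ k dp entries (simpler; not faster).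

-- ===== PORT A =====
-- loop body of A: pop expired indices from the deque front, set dp[i], pop dominated indices from the back, append i
def solveStep (nums : List Int) (k : Int) (s : List Int × List Int) (i : Int) : List Int × List Int :=
  let dp := s.1
  let q := s.2.dropWhile (fun j => i - j > k)          -- while queue and i - queue[0] > k: popleft
  let v := PySem.List.pyGetD nums i 0 + PySem.List.pyGetD dp (q.headD 0) 0   -- dp[i] = nums[i] + dp[queue[0]]
  let dp' := PySem.List.pySetD dp i v
  -- while queue and dp[queue[-1]] > dp[i]: pop   (pop from the back = reverse, dropWhile, reverse)
  let q' := (q.reverse.dropWhile (fun j => PySem.List.pyGetD dp' j 0 > v)).reverse ++ [i]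
  (dp', q')

def solve (nums : List Int) (k : Int) : Int :=
  let n := nums.length
  let dp := PySem.List.pySetD (List.replicate n ((10:Int)^20)) 0 (PySem.List.pyGetD nums 0 0)
  let s := (PySem.List.pyRange 1 (n : Int) 1).foldl (solveStep nums k) (dp, [(0 : Int)])
  PySem.List.pyGetD s.1 (-1) 0

-- ===== PORT B =====
-- loop body of B: append nums[i] + min(dp[max(0,i-k):i]) to the growing dp list
def solveAltStep (nums : List Int) (k : Int) (dp : List Int) (i : Int) : List Int :=
  let lo := max 0 (i - k)
  dp ++ [PySem.List.pyGetD nums i 0 +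
         (PySem.List.min? (PySem.List.slice dp (some lo) (some i)) (fun x => x)).getD 0]

def solve_alt (nums : List Int) (k : Int) : Int :=
  let dp := (PySem.List.pyRange 1 (nums.length : Int) 1).foldl (solveAltStep nums k)
              [PySem.List.pyGetD nums 0 0]
  PySem.List.pyGetD dp (-1) 0

-- ===== PRECONDITION & SPEC =====
-- Pre excludes exactly the inputs where A raises: empty nums (IndexError on dp[0] = nums[0]) and
-- k ≤ 0 with at least two elements (the deque is emptied at i = 1 and dp[queue[0]] raises IndexError).
def Pre_solve (nums : List Int) (k : Int) : Prop := nums ≠ [] ∧ (1 ≤ k ∨ nums.length = 1)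
instance (nums : List Int) (k : Int) : Decidable (Pre_solve nums k) := by unfold Pre_solve; infer_instance
def pvWitness_solve : List Int × Int := ([3, 1, 4, 1, 5], 2)

def Spec_solve (nums : List Int) (k : Int) (out : Int) : Prop := out = solve_alt nums k
instance (nums : List Int) (k : Int) (out : Int) : Decidable (Spec_solve nums k out) := by unfold Spec_solve; infer_instance

-- ===== CLAIM (what is proved, stated in full; the proofs are below) =====
def Claim_equal_solve : Prop := ∀ (nums : List Int) (k : Int), Dom_solve nums k → Pre_solve nums k → Spec_solve nums k (solve nums k)

-- ===== LEMMAS AND PROOFS =====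

-- reference dp prefix list: bdpl m = the dp list after B has processed indices 1..m
def bdpl (nums : List Int) (k : Int) : Nat → List Int
  | 0 => [PySem.List.pyGetD nums 0 0]
  | m+1 =>
    let d := bdpl nums k m
    d ++ [PySem.List.pyGetD nums ((m : Int)+1) 0 +
          (PySem.List.min? (PySem.List.slice d (some (max 0 ((m : Int)+1-k))) (some ((m : Int)+1))) (fun x => x)).getD 0]

-- the reference dp value at index j
def refD (nums : List Int) (k : Int) (j : Nat) : Int := (bdpl nums k j).getD j 0

theorem length_bdpl (nums : List Int) (k : Int) (m : Nat) : (bdpl nums k m).length = m + 1 := by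
  induction m with
  | zero => rfl
  | succ m ih => simp [bdpl, ih]

theorem bdpl_getD (nums : List Int) (k : Int) {j m : Nat} (h : j ≤ m) :
    (bdpl nums k m).getD j 0 = refD nums k j := by
  induction m with
  | zero => interval_cases j; rfl
  | succ m ih =>
    rcases Nat.lt_or_ge j (m+1) with hj | hj
    · rw [← ih (Nat.lt_succ_iff.mp hj)]
      simp only [bdpl]
      rw [List.getD_append _ _ _ _ (by rw [length_bdpl]; omega)]
    · have hj' : j = m + 1 := by omega
      subst hj'
      rfl

theorem solve_alt_foldl (nums : List Int) (k : Int) (m : Nat) :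
    (PySem.List.pyRange 1 ((m : Int) + 1) 1).foldl (solveAltStep nums k) [PySem.List.pyGetD nums 0 0]
      = bdpl nums k m := by
  induction m with
  | zero => simp [PySem.List.pyRange_one_eq_nil, bdpl]
  | succ m ih =>
    push_cast at ih ⊢
    rw [PySem.List.pyRange_one_succ_right (by omega), List.foldl_append, ih]
    simp [bdpl, solveAltStep]

-- ===== the A-side invariant =====

def QInv (nums : List Int) (k : Int) (m : Nat) (q : List Int) : Prop :=
  (∀ a ∈ q, ∃ j : Nat, a = (j : Int) ∧ j ≤ m) ∧
  ((m : Int) ∈ q) ∧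
  q.Pairwise (fun a b => refD nums k a.toNat ≤ refD nums k b.toNat) ∧
  (∀ j : Nat, (((m : Int) + 1 - k)).toNat ≤ j → j ≤ m →
    ∃ a ∈ q, (j : Int) ≤ a ∧ refD nums k a.toNat ≤ refD nums k j)

-- generic list helpers
theorem mem_dropWhile_of_not {α : Type} (p : α → Bool) {l : List α} {x : α}
    (hx : x ∈ l) (hp : ¬ p x) : x ∈ l.dropWhile p := by
  induction l with
  | nil => cases hx
  | cons a l ih =>
    rw [List.dropWhile_cons]
    by_cases ha : p a
    · simp only [ha, if_true]
      rcases List.mem_cons.mp hx with h | h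
      · exact absurd (h ▸ ha) hp
      · exact ih h
    · simpa [ha] using hx

theorem pred_of_mem_not_mem_dropWhile {α : Type} (p : α → Bool) {l : List α} {x : α}
    (hx : x ∈ l) (hnd : x ∉ l.dropWhile p) : p x := by
  by_contra h
  exact hnd (mem_dropWhile_of_not p hx h)

theorem head_dropWhile_not {α : Type} (p : α → Bool) (l : List α) (d : α)
    (h : l.dropWhile p ≠ []) : ¬ p ((l.dropWhile p).headD d) := by
  induction l with
  | nil => simp at h
  | cons a l ih =>
    rw [List.dropWhile_cons]
    by_cases ha : p a
    · simp only [ha, if_true]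
      exact ih (by simpa [List.dropWhile_cons, ha] using h)
    · simp [ha]

theorem mem_headD {α : Type} {l : List α} (d : α) (h : l ≠ []) : l.headD d ∈ l := by
  cases l with
  | nil => exact absurd rfl h
  | cons a l => simp

-- min over the window [lo, m] of refD, as B's slice computes it
theorem window_min_eq (nums : List Int) (k : Int) (m h : Nat)
    (hlo : (((m : Int) + 1 - k)).toNat ≤ h) (hm : h ≤ m)
    (hmin : ∀ j : Nat, (((m : Int) + 1 - k)).toNat ≤ j → j ≤ m → refD nums k h ≤ refD nums k j) :
    (PySem.List.min? (PySem.List.slice (bdpl nums k m) (some (max 0 ((m : Int)+1-k))) (some ((m : Int)+1))) (fun x => x)).getD 0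
      = refD nums k h := by
  have hlen := length_bdpl nums k m
  rw [PySem.List.slice_toNat _ (le_max_left 0 _) (by positivity)]
  have hlo2 : (max 0 ((m : Int)+1-k)).toNat = (((m : Int)+1-k)).toNat := by omega
  have hmn : ((m : Int)+1).toNat = m + 1 := by omega
  rw [hlo2, hmn]
  set lo := (((m : Int)+1-k)).toNat with hlodef
  have htake : ((bdpl nums k m).drop lo).take (m + 1 - lo) = (bdpl nums k m).drop lo := by
    apply List.take_of_length_le
    rw [List.length_drop, hlen]
  rw [htake]
  -- every element of the dropped list is refD of an index in [lo, m]
  have hchar : ∀ y ∈ (bdpl nums k m).drop lo, ∃ j : Nat, lo ≤ j ∧ j ≤ m ∧ y = refD nums k j := by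
    intro y hy
    obtain ⟨t, ht, hyt⟩ := List.mem_iff_getElem.mp hy
    have htl : lo + t < (bdpl nums k m).length := by
      rw [List.length_drop, hlen] at ht
      omega
    refine ⟨lo + t, by omega, by rw [hlen] at htl; omega, ?_⟩
    rw [← hyt, List.getElem_drop, ← List.getD_eq_getElem _ 0 htl,
        bdpl_getD nums k (by rw [hlen] at htl; omega)]
  -- refD h is a member
  have hhm : refD nums k h ∈ (bdpl nums k m).drop lo := by
    have hlt : h - lo < ((bdpl nums k m).drop lo).length := by
      rw [List.length_drop, hlen]; omega
    have : ((bdpl nums k m).drop lo)[h - lo]'hlt = refD nums k h := by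
      rw [List.getElem_drop, ← List.getD_eq_getElem _ 0 (by rw [hlen]; omega),
          bdpl_getD nums k (show lo + (h - lo) ≤ m by omega)]
      congr 1
      omega
    rw [← this]
    exact List.getElem_mem hlt
  cases hmin? : PySem.List.min? ((bdpl nums k m).drop lo) (fun x => x) with
  | none =>
    rw [PySem.List.min?_eq_none_iff] at hmin?
    rw [hmin?] at hhm
    cases hhm
  | some mv =>
    have hmem := PySem.List.min?_mem hmin?
    have hisMin := PySem.List.min?_isMin hmin?
    obtain ⟨j, hj1, hj2, hjv⟩ := hchar mv hmem
    simp only [Option.getD_some]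
    exact le_antisymm (hisMin (refD nums k h) hhm) (hjv ▸ hmin j hj1 hj2)

-- unfolding the recurrence: the value appended at step m+1
theorem refD_succ (nums : List Int) (k : Int) (m : Nat) :
    refD nums k (m+1) = PySem.List.pyGetD nums ((m : Int)+1) 0 +
      (PySem.List.min? (PySem.List.slice (bdpl nums k m) (some (max 0 ((m : Int)+1-k))) (some ((m : Int)+1))) (fun x => x)).getD 0 := by
  show (bdpl nums k (m+1)).getD (m+1) 0 = _
  simp only [bdpl]
  rw [List.getD_append_right _ _ _ _ (by rw [length_bdpl])]
  simp [length_bdpl]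

theorem bdpl_succ (nums : List Int) (k : Int) (m : Nat) :
    bdpl nums k (m+1) = bdpl nums k m ++ [refD nums k (m+1)] := by
  rw [refD_succ]
  rfl

-- the step preserves the invariant and extends the dp array by refD (m+1)
theorem step_inv (nums : List Int) (k : Int) (m : Nat) (q : List Int)
    (hk : 1 ≤ k) (hn : m + 1 < nums.length) (hq : QInv nums k m q) :
    solveStep nums k (bdpl nums k m ++ List.replicate (nums.length - (m+1)) ((10:Int)^20), q) ((m : Int) + 1)
      = (bdpl nums k (m+1) ++ List.replicate (nums.length - (m+2)) ((10:Int)^20),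
         (solveStep nums k (bdpl nums k m ++ List.replicate (nums.length - (m+1)) ((10:Int)^20), q) ((m : Int) + 1)).2)
      ∧ QInv nums k (m+1) (solveStep nums k (bdpl nums k m ++ List.replicate (nums.length - (m+1)) ((10:Int)^20), q) ((m : Int) + 1)).2 := by
  obtain ⟨hshape, hmem, hpw, hdom⟩ := hq
  have hlend := length_bdpl nums k m
  set d := bdpl nums k m with hd
  set R := List.replicate (nums.length - (m+1)) ((10:Int)^20) with hR
  set i : Int := (m : Int) + 1 with hi
  set p1 : Int → Bool := fun j => decide (i - j > k) with hp1
  set q1 := q.dropWhile p1 with hq1def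
  set v0 := PySem.List.pyGetD nums i 0 + PySem.List.pyGetD (d ++ R) (q1.headD 0) 0 with hv0
  set dps := PySem.List.pySetD (d ++ R) i v0 with hdpsdef
  set p2 : Int → Bool := fun j => decide (PySem.List.pyGetD dps j 0 > v0) with hp2
  set q2 := (q1.reverse.dropWhile p2).reverse ++ [i] with hq2def
  have hunfold : solveStep nums k (d ++ R, q) i = (dps, q2) := rfl
  -- the head of the pruned deque
  have hmq1 : (m : Int) ∈ q1 := mem_dropWhile_of_not p1 hmem (by simp [hp1, hi]; omega)
  have hq1ne : q1 ≠ [] := List.ne_nil_of_mem hmq1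
  have hq1sub : ∀ a ∈ q1, a ∈ q := fun a ha => (List.dropWhile_sublist p1).subset ha
  have hq1pw : q1.Pairwise (fun a b => refD nums k a.toNat ≤ refD nums k b.toNat) :=
    hpw.sublist (List.dropWhile_sublist p1)
  obtain ⟨jh, hjh_eq, hjh_le⟩ := hshape (q1.headD 0) (hq1sub _ (mem_headD 0 hq1ne))
  have hh0pred : ¬ p1 (q1.headD 0) = true := head_dropWhile_not p1 q 0 hq1ne
  have hjh_lo : (((m : Int)+1-k)).toNat ≤ jh := by
    rw [hjh_eq] at hh0pred
    simp only [hp1, hi, decide_eq_true_eq, not_lt] at hh0pred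
    omega
  -- q1's head value is minimal on q1
  have hheadmin : ∀ a ∈ q1, refD nums k jh ≤ refD nums k a.toNat := by
    obtain ⟨hd1, tl1, hcons⟩ := List.ne_nil_iff_exists_cons.mp hq1ne
    have hhd : q1.headD 0 = hd1 := by rw [hcons]; rfl
    intro a ha
    rw [hcons] at ha
    rcases List.mem_cons.mp ha with rfl | hatl
    · rw [← hhd, hjh_eq]; simp
    · have h := (List.pairwise_cons.mp (hcons ▸ hq1pw)).1 a hatl
      have hjd : hd1.toNat = jh := by rw [← hhd, hjh_eq]; simp
      rw [← hjd]
      exact h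
  -- dp[queue[0]] = the window minimum
  have hminwin : ∀ j : Nat, (((m : Int)+1-k)).toNat ≤ j → j ≤ m → refD nums k jh ≤ refD nums k j := by
    intro j hj1 hj2
    obtain ⟨a, haq, hja, hda⟩ := hdom j hj1 hj2
    obtain ⟨ja, haeq, hja_le⟩ := hshape a haq
    have haq1 : a ∈ q1 := mem_dropWhile_of_not p1 haq (by
      simp only [hp1, hi, decide_eq_true_eq, not_lt]
      have h1 := Int.self_le_toNat ((m : Int)+1-k)
      have h2 : ((((m : Int)+1-k)).toNat : Int) ≤ (j : Int) := by exact_mod_cast hj1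
      omega)
    calc refD nums k jh ≤ refD nums k a.toNat := hheadmin a haq1
      _ ≤ refD nums k j := hda
  have hgetd : ∀ j : Nat, j ≤ m → PySem.List.pyGetD (d ++ R) (j : Int) 0 = refD nums k j := by
    intro j hj
    rw [PySem.List.pyGetD_natCast, List.getD_append _ _ _ _ (by omega), hd, bdpl_getD nums k hj]
  have hv0eq : v0 = refD nums k (m+1) := by
    rw [hv0, refD_succ, hjh_eq, hgetd jh hjh_le,
        window_min_eq nums k m jh hjh_lo hjh_le hminwin, hi]
  have hdps : dps = bdpl nums k (m+1) ++ List.replicate (nums.length - (m+2)) ((10:Int)^20) := by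
    rw [hdpsdef, hv0eq, show i = ((m+1 : Nat) : Int) by rw [hi]; push_cast; ring,
        PySem.List.pySetD_natCast, List.set_append_right _ _ (by omega), hR,
        show nums.length - (m+1) = (nums.length - (m+2)) + 1 by omega, List.replicate_succ,
        show m + 1 - d.length = 0 by omega, List.set_cons_zero, bdpl_succ, hd]
    simp
  have hget' : ∀ j : Nat, j ≤ m+1 → PySem.List.pyGetD dps (j : Int) 0 = refD nums k j := by
    intro j hj
    rw [hdps, PySem.List.pyGetD_natCast,
        List.getD_append _ _ _ _ (by rw [length_bdpl]; omega), bdpl_getD nums k hj]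
  refine ⟨by rw [hunfold, hdps], ?_⟩
  rw [hunfold]
  -- the new deque
  set K := q1.reverse.dropWhile p2 with hK
  have hKsubrev : K.Sublist q1.reverse := List.dropWhile_sublist p2
  have hKsub : ∀ a ∈ K, a ∈ q1 := fun a ha => List.mem_reverse.mp (hKsubrev.subset ha)
  have hshape1 : ∀ a ∈ q1, ∃ j : Nat, a = (j : Int) ∧ j ≤ m := fun a ha => hshape a (hq1sub a ha)
  -- the element left at the back of the pruned deque (if any) is ≤ dp[i]
  have hKle : ∀ a ∈ K, refD nums k a.toNat ≤ refD nums k (m+1) := by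
    intro a ha
    have hKne : K ≠ [] := List.ne_nil_of_mem ha
    obtain ⟨h2, t2, hKcons⟩ := List.ne_nil_iff_exists_cons.mp hKne
    have hh2 : K.headD 0 = h2 := by rw [hKcons]; rfl
    have hh2pred : ¬ p2 (K.headD 0) = true := head_dropWhile_not p2 q1.reverse 0 hKne
    obtain ⟨j2, hj2eq, hj2le⟩ := hshape1 h2 (hKsub h2 (by rw [hKcons]; exact List.mem_cons_self))
    have hh2le : refD nums k h2.toNat ≤ refD nums k (m+1) := by
      rw [hh2, hj2eq] at hh2pred
      rw [hj2eq]
      simp only [hp2, decide_eq_true_eq, not_lt] at hh2pred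
      rw [hget' j2 (by omega), hv0eq] at hh2pred
      simpa using hh2pred
    have hKpwflip : K.Pairwise (fun a b => refD nums k b.toNat ≤ refD nums k a.toNat) :=
      (List.pairwise_reverse.mpr hq1pw).sublist hKsubrev
    rw [hKcons] at ha
    rcases List.mem_cons.mp ha with rfl | hatl
    · exact hh2le
    · have := (List.pairwise_cons.mp (hKcons ▸ hKpwflip)).1 a hatl
      exact le_trans this hh2le
  constructor
  · -- shapes
    intro a ha
    rcases List.mem_append.mp ha with haK | hai
    · obtain ⟨j, hjeq, hjle⟩ := hshape1 a (hKsub a (List.mem_reverse.mp haK))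
      exact ⟨j, hjeq, by omega⟩
    · refine ⟨m+1, ?_, le_refl _⟩
      rw [List.mem_singleton.mp hai, hi]
      push_cast
      ring
  refine ⟨?_, ?_, ?_⟩
  · -- m+1 is in the deque
    apply List.mem_append_right
    rw [hi]
    simp only [List.mem_singleton]
    push_cast
    ring
  · -- pairwise
    rw [List.pairwise_append]
    refine ⟨?_, List.pairwise_singleton _ _, ?_⟩
    · exact List.pairwise_reverse.mpr ((List.pairwise_reverse.mpr hq1pw).sublist hKsubrev)
    · intro a haK b hbi
      rw [List.mem_singleton.mp hbi]
      have : i.toNat = m + 1 := by rw [hi]; omega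
      rw [this]
      exact hKle a (List.mem_reverse.mp haK)
  · -- domination
    intro j hj1 hj2
    by_cases hjm : j = m + 1
    · subst hjm
      refine ⟨i, List.mem_append_right _ (by simp), by rw [hi]; push_cast; omega, ?_⟩
      have : i.toNat = m + 1 := by rw [hi]; omega
      rw [this]
    · have hjm' : j ≤ m := by omega
      have hj1' : (((m : Int)+1-k)).toNat ≤ j := by
        have : (((m+1 : Nat) : Int)+1-k).toNat ≤ j := hj1
        omega
      obtain ⟨a, haq, hja, hda⟩ := hdom j hj1' hjm'
      have haq1 : a ∈ q1 := mem_dropWhile_of_not p1 haq (by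
        simp only [hp1, hi, decide_eq_true_eq, not_lt]
        have h1 := Int.self_le_toNat ((m : Int)+1-k)
        have h2 : ((((m : Int)+1-k)).toNat : Int) ≤ (j : Int) := by exact_mod_cast hj1'
        omega)
      by_cases haK : a ∈ K
      · exact ⟨a, List.mem_append_left _ (List.mem_reverse.mpr haK), hja, hda⟩
      · have hp2a : p2 a = true :=
          pred_of_mem_not_mem_dropWhile p2 (List.mem_reverse.mpr haq1) haK
        obtain ⟨ja, haeq, hjale⟩ := hshape1 a haq1
        have hlt : refD nums k (m+1) < refD nums k a.toNat := by
          rw [haeq] at hp2a ⊢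
          simp only [hp2, decide_eq_true_eq] at hp2a
          rw [hget' ja (by omega), hv0eq] at hp2a
          simpa using hp2a
        refine ⟨i, List.mem_append_right _ (by simp), by rw [hi]; omega, ?_⟩
        have : i.toNat = m + 1 := by rw [hi]; omega
        rw [this]
        exact le_of_lt (lt_of_lt_of_le hlt hda)

theorem a_fold (nums : List Int) (k : Int) (m : Nat)
    (hk : 1 ≤ k) (hn : m < nums.length) :
    ∃ q, (PySem.List.pyRange 1 ((m : Int) + 1) 1).foldl (solveStep nums k)
            (bdpl nums k 0 ++ List.replicate (nums.length - 1) ((10:Int)^20), [(0 : Int)])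
          = (bdpl nums k m ++ List.replicate (nums.length - (m+1)) ((10:Int)^20), q)
        ∧ QInv nums k m q := by
  induction m with
  | zero =>
    refine ⟨[(0 : Int)], by simp [PySem.List.pyRange_one_eq_nil], ?_⟩
    refine ⟨by intro a ha; exact ⟨0, by simpa using ha, le_refl 0⟩, by simp, by simp, ?_⟩
    intro j _ hj
    have hj0 : j = 0 := by omega
    subst hj0
    exact ⟨0, by simp, by simp, le_refl _⟩
  | succ m ih =>
    obtain ⟨q, hfold, hq⟩ := ih (by omega)
    obtain ⟨hdp, hq'⟩ := step_inv nums k m q hk (by omega) hq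
    refine ⟨(solveStep nums k (bdpl nums k m ++ List.replicate (nums.length - (m+1)) ((10:Int)^20), q) ((m : Int) + 1)).2, ?_, hq'⟩
    push_cast at hfold hdp ⊢
    rw [PySem.List.pyRange_one_succ_right (by omega), List.foldl_append, hfold]
    conv_lhs => rw [List.foldl_cons, List.foldl_nil, hdp]

-- ===== VERDICT (by name: the statement is the Claim_ definition above) =====
theorem solve_init (nums : List Int) (k : Int) (hne : nums ≠ []) :
    PySem.List.pySetD (List.replicate nums.length ((10:Int)^20)) 0 (PySem.List.pyGetD nums 0 0)
      = bdpl nums k 0 ++ List.replicate (nums.length - 1) ((10:Int)^20) := by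
  have hn : 1 ≤ nums.length := List.length_pos_of_ne_nil hne
  rw [show (0:Int) = ((0:Nat):Int) by rfl, PySem.List.pySetD_natCast,
      show nums.length = (nums.length - 1) + 1 by omega, List.replicate_succ, List.set_cons_zero]
  rfl

theorem solve_spec : Claim_equal_solve := by
  intro nums k _hdom hpre
  obtain ⟨hne, hko⟩ := hpre
  unfold Spec_solve
  have hn : 1 ≤ nums.length := List.length_pos_of_ne_nil hne
  rcases hko with hk | h1
  · -- general case: nums ≠ [], 1 ≤ k
    obtain ⟨q, hfold, _⟩ := a_fold nums k (nums.length - 1) hk (by omega)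
    have hcast : (nums.length : Int) = ((nums.length - 1 : Nat) : Int) + 1 := by
      omega
    simp only [solve, solve_alt]
    rw [solve_init nums k hne, hcast, hfold, solve_alt_foldl]
    rw [show nums.length - (nums.length - 1 + 1) = 0 by omega]
    simp
  · -- single-element list, any k
    match nums, h1 with
    | [x], _ =>
      show solve [x] k = solve_alt [x] k
      simp only [solve, solve_alt, List.length_cons, List.length_nil, Nat.cast_one, Nat.zero_add]
      rw [PySem.List.pyRange_one_eq_nil (by norm_num)]
      simp only [List.foldl_nil, PySem.List.pyGetD_zero_cons, List.replicate_one]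
      rw [PySem.List.pySetD_of_nonneg _ _ (le_refl (0:Int))]
      simp only [Int.toNat_zero, List.set_cons_zero]
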